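-- pv_equiv track=rewrite | github.com/Rohanjain2312/graphbench | graphbench/community/detector.py | group_triples
-- ===== SOURCE A (Python) =====
-- from collections import defaultdict
--
-- def group_triples(
--
--     partition: dict[str, int],
--     triples: list[tuple[str, str, str]],
-- ) -> dict[int, list[tuple[str, str, str]]]:
--     """Group triples by community ID.
--
--     A triple is assigned to the community of its *subject* entity.
--     Triples whose subject is not in the partition are placed in
--     community ``-1`` (unassigned).
--
--     Args:
--         partition: ``{entity: community_id}`` mapping from :meth:`detect`.
--         triples: List of ``(subject, relation, object)`` triples.
--
--     Returns:
--         ``{community_id: [triple, ...]}`` grouping.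
--     """
--     groups: dict[int, list[tuple[str, str, str]]] = defaultdict(list)
--     for subj, rel, obj in triples:
--         cid = partition.get(subj, partition.get(obj, -1))
--         groups[cid].append((subj, rel, obj))
--     return dict(groups)
-- ===== SOURCE B (Python) =====
-- def group_triples(partition, triples):
--     """Group triples by community id: dedup the key sequence in first-occurrence
--     order, then collect each group with one filter pass per distinct key."""
--     def key(t):
--         return partition.get(t[0], partition.get(t[2], -1))
--     keys = [key(t) for t in triples]
--     order = list(dict.fromkeys(keys))
--     return {c: [t for t, k in zip(triples, keys) if k == c] for c in order}
-- ===== Notes on version B (the rewrite author's own statement) =====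
-- stated objective: alternative
-- what changed: Replaces the single-pass defaultdict accumulation with a sort-free group-by: compute the key sequence once, dedup it in first-occurrence order (dict.fromkeys), then build each group by one filter pass over zip(triples, keys).
import Mathlib
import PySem

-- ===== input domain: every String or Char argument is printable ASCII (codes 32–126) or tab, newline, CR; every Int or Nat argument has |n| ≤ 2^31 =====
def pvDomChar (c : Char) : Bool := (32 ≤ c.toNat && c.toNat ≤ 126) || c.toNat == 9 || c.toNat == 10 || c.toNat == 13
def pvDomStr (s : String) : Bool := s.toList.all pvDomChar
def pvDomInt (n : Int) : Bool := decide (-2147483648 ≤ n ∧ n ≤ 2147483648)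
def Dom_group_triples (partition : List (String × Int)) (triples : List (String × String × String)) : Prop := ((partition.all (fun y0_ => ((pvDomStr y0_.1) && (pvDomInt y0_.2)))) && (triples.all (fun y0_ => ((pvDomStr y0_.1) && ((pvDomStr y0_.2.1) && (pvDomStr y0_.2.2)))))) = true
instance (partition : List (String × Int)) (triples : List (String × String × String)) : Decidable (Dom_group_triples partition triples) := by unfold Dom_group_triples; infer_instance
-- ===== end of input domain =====

-- B changes the decomposition: one ordered-dedup of the key sequence, then one filter pass per distinct key (alternative shape, not faster).

-- partition.get(k, dflt) on the association list (first match, per the type convention)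
def pvGet (partition : List (String × Int)) (k : String) (dflt : Int) : Int :=
  match partition.find? (fun q => q.1 == k) with
  | some q => q.2
  | none => dflt

-- ===== PORT A =====
-- defaultdict(list) accumulation: groups[cid].append(t) is Dict.modify cid [] (· ++ [t]); dict(groups) returns the items.
def group_triples (partition : List (String × Int)) (triples : List (String × String × String)) : List (Int × List (String × String × String)) :=
  (triples.foldl
    (fun g t =>
      let cid := pvGet partition t.1 (pvGet partition t.2.2 (-1))
      g.modify cid [] (· ++ [t]))
    (PySem.Dict.empty : PySem.Dict Int (List (String × String × String)))).items

-- ===== PORT B =====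
def pvKey (partition : List (String × Int)) (t : String × String × String) : Int :=
  pvGet partition t.1 (pvGet partition t.2.2 (-1))

def group_triples_alt (partition : List (String × Int)) (triples : List (String × String × String)) : List (Int × List (String × String × String)) :=
  let keys := triples.map (pvKey partition)
  let order := PySem.List.dedup keys
  order.map (fun c => (c, ((triples.zip keys).filter (fun p => p.2 == c)).map (·.1)))

-- ===== PRECONDITION & SPEC =====
def Spec_group_triples (partition : List (String × Int)) (triples : List (String × String × String)) (out : List (Int × List (String × String × String))) : Prop := out = group_triples_alt partition triples
instance (partition : List (String × Int)) (triples : List (String × String × String)) (out : List (Int × List (String × String × String))) : Decidable (Spec_group_triples partition triples out) := by unfold Spec_group_triples; infer_instance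

-- ===== CLAIM (what is proved, stated in full; the proofs are below) =====
def Claim_equal_group_triples : Prop := ∀ (partition : List (String × Int)) (triples : List (String × String × String)), Dom_group_triples partition triples → Spec_group_triples partition triples (group_triples partition triples)

-- ===== LEMMAS AND PROOFS =====

-- ===== VERDICT (by name: the statement is the Claim_ definition above) =====
theorem group_triples_spec : Claim_equal_group_triples := by
  intro partition triples _
  unfold Spec_group_triples group_triples group_triples_alt
  simp only []
  set f := pvKey partition with hf
  have hstep : (fun (g : PySem.Dict Int (List (String × String × String))) t =>
      let cid := pvGet partition t.1 (pvGet partition t.2.2 (-1))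
      g.modify cid [] (· ++ [t])) = fun g t => g.modify (f t) [] (· ++ [t]) := rfl
  rw [hstep]
  set d := triples.foldl (fun g t => g.modify (f t) [] (· ++ [t]))
      (PySem.Dict.empty : PySem.Dict Int (List (String × String × String))) with hd
  have hnd : d.keys.Nodup := by
    rw [hd]
    exact PySem.Dict.nodup_keys_foldl_modify_key triples f [] (fun g t => (· ++ [t])) _
      PySem.Dict.nodup_keys_empty
  have hkeys : d.keys = PySem.Set.ofList (triples.map f) := by
    rw [hd, PySem.Dict.keys_foldl_modify_key]
    simp [PySem.Set.update_nil_left]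
  have hval : ∀ c : Int, d.getD c [] =
      ((triples.zip (triples.map f)).filter (fun p => p.2 == c)).map (·.1) := by
    intro c
    have hpair : d = (triples.map (fun t => (f t, t))).foldl
        (fun d p => d.modify p.1 [] (· ++ [p.2])) PySem.Dict.empty := by
      rw [hd, List.foldl_map]
    rw [hpair, PySem.Dict.getD_foldl_modify_append, ← List.map_prod_left_eq_zip,
        List.filter_map, List.filter_map, List.map_map, List.map_map]
    simp [Function.comp_def]
  rw [PySem.Dict.items_eq_map_keys d hnd [], hkeys, PySem.List.dedup_eq_ofList]
  exact List.map_congr_left (fun c _ => by rw [hval c])
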